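-- pv_equiv track=rewrite | github.com/xiaoniaoyouhuajiang/Ferrumpy | python/ferrumpy/serializer.py | _split_generic_params
-- ===== SOURCE A (Python) =====
-- from typing import Any, Dict, List, Optional, Set
--
-- def _split_generic_params(params: str) -> List[str]:
--     """
--     Split generic parameters respecting nested angle brackets.
--
--     Examples:
--         "i32, String" -> ["i32", "String"]
--         "Vec<i32>, Option<String>" -> ["Vec<i32>", "Option<String>"]
--     """
--     result = []
--     current = ""
--     depth = 0
--
--     for char in params:
--         if char == '<':
--             depth += 1
--             current += char
--         elif char == '>':
--             depth -= 1
--             current += char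
--         elif char == ',' and depth == 0:
--             result.append(current.strip())
--             current = ""
--         else:
--             current += char
--
--     if current.strip():
--         result.append(current.strip())
--
--     return result
-- ===== SOURCE B (Python) =====
-- def _find_top_comma(s):
--     """Index of the first comma at angle-bracket depth 0, or -1."""
--     depth = 0
--     for i, ch in enumerate(s):
--         if ch == '<':
--             depth += 1
--         elif ch == '>':
--             depth -= 1
--         elif ch == ',' and depth == 0:
--             return i
--     return -1
--
--
-- def _split_generic_params(params):
--     result = []
--     rest = params
--     while True:
--         i = _find_top_comma(rest)
--         if i < 0:
--             tail = rest.strip()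
--             if tail:
--                 result.append(tail)
--             return result
--         result.append(rest[:i].strip())
--         rest = rest[i + 1:]
-- ===== Notes on version B (the rewrite author's own statement) =====
-- stated objective: alternative
-- what changed: Replaces A's single accumulator-building fold with a recursive split: repeatedly find the first top-level comma and slice the segment off the front, stripping each slice.
import Mathlib
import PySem

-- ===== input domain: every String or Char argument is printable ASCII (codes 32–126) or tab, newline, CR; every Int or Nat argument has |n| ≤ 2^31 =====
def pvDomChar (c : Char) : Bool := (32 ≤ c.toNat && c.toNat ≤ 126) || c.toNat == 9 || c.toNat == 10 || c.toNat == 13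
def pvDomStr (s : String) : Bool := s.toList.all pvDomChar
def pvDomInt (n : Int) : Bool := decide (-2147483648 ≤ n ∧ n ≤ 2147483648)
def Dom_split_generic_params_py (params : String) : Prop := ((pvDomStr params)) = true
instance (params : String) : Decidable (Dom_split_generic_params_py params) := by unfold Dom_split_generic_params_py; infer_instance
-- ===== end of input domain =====

-- B replaces A's single accumulator fold by a recursive split at the first top-level comma; same cost, alternative decomposition.


-- ===== PORT A =====
-- A's loop body: state (result, current, depth), branches in A's order.
def stepA (st : List String × List Char × Int) (c : Char) : List String × List Char × Int :=
  let (result, current, depth) := st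
  if c = '<' then (result, current ++ [c], depth + 1)
  else if c = '>' then (result, current ++ [c], depth - 1)
  else if c = ',' ∧ depth = 0 then (result ++ [String.ofList (PySem.Chars.strip current)], [], depth)
  else (result, current ++ [c], depth)

def split_generic_params_py (params : String) : List String :=
  let st := params.toList.foldl stepA ([], [], 0)
  if PySem.Chars.strip st.2.1 ≠ [] then st.1 ++ [String.ofList (PySem.Chars.strip st.2.1)] else st.1

-- ===== PORT B =====
-- _find_top_comma: the enumerate loop as structural recursion; none = -1.
def cutB : List Char → Int → Option Nat
  | [], _ => none
  | c :: cs, d =>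
    if c = '<' then (cutB cs (d + 1)).map (· + 1)
    else if c = '>' then (cutB cs (d - 1)).map (· + 1)
    else if c = ',' ∧ d = 0 then some 0
    else (cutB cs d).map (· + 1)

theorem cutB_lt (cs : List Char) (d : Int) (i : Nat) (h : cutB cs d = some i) : i < cs.length := by
  induction cs generalizing d i with
  | nil => simp [cutB] at h
  | cons c cs ih =>
    simp only [cutB] at h
    split_ifs at h <;>
      first
        | (simp only [Option.map_eq_some_iff] at h
           obtain ⟨j, hj, rfl⟩ := h
           simpa using Nat.succ_lt_succ (ih _ _ hj))
        | (simp_all; omega)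

-- the while loop of B: rest[:i] is take i, rest[i+1:] is drop (i+1) (i ≥ 0: exact).
def goB (s : List Char) : List String :=
  match h : cutB s 0 with
  | none => let t := PySem.Chars.strip s; if t ≠ [] then [String.ofList t] else []
  | some i => String.ofList (PySem.Chars.strip (s.take i)) :: goB (s.drop (i + 1))
termination_by s.length
decreasing_by
  have := cutB_lt s 0 i h
  simp only [List.length_drop]; omega

def split_generic_params_py_alt (params : String) : List String := goB params.toList

-- ===== PRECONDITION & SPEC =====
def Spec_split_generic_params_py (params : String) (out : List String) : Prop := out = split_generic_params_py_alt params
instance (params : String) (out : List String) : Decidable (Spec_split_generic_params_py params out) := by unfold Spec_split_generic_params_py; infer_instance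

-- ===== CLAIM (what is proved, stated in full; the proofs are below) =====
def Claim_equal_split_generic_params_py : Prop := ∀ (params : String), Dom_split_generic_params_py params → Spec_split_generic_params_py params (split_generic_params_py params)

-- ===== LEMMAS AND PROOFS =====

-- proof-side: B's answer for a suffix cs, with cur the characters accumulated since
-- the last cut and d the current depth (generalises goB).
def G (cur : List Char) (d : Int) (cs : List Char) : List String :=
  match cutB cs d with
  | none => let t := PySem.Chars.strip (cur ++ cs); if t ≠ [] then [String.ofList t] else []
  | some i => String.ofList (PySem.Chars.strip (cur ++ cs.take i)) :: goB (cs.drop (i + 1))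

theorem G_nil_zero (cs : List Char) : G [] 0 cs = goB cs := by
  rw [goB]
  unfold G
  cases h : cutB cs 0 <;> simp

-- A's finish step applied to a loop state.
def finishA (st : List String × List Char × Int) : List String :=
  if PySem.Chars.strip st.2.1 ≠ [] then st.1 ++ [String.ofList (PySem.Chars.strip st.2.1)] else st.1

theorem foldA_eq_G (cs : List Char) : ∀ (res : List String) (cur : List Char) (d : Int),
    finishA (cs.foldl stepA (res, cur, d)) = res ++ G cur d cs := by
  induction cs with
  | nil =>
    intro res cur d
    simp only [List.foldl_nil, finishA, G, cutB, List.append_nil]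
    split_ifs <;> simp
  | cons c cs ih =>
    intro res cur d
    simp only [List.foldl_cons, stepA]
    by_cases h1 : c = '<'
    · simp only [h1, ih]
      congr 1
      unfold G
      simp only [cutB]
      cases h : cutB cs (d + 1) <;>
        simp [h, List.append_assoc]
    · by_cases h2 : c = '>'
      · simp only [h2, ih]
        congr 1
        unfold G
        simp only [cutB]
        cases h : cutB cs (d - 1) <;>
          simp [h, List.append_assoc]
      · by_cases h3 : c = ',' ∧ d = 0
        · simp only [if_neg h1, if_neg h2, if_pos h3, ih]
          unfold G
          simp only [cutB, if_neg h1, if_neg h2, if_pos h3]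
          rw [List.append_assoc]
          congr 1
          rw [← G_nil_zero]
          unfold G
          obtain ⟨-, rfl⟩ := h3
          cases h : cutB cs 0 <;> simp [h]
        · simp only [if_neg h1, if_neg h2, if_neg h3, ih]
          congr 1
          unfold G
          simp only [cutB, if_neg h1, if_neg h2, if_neg h3]
          cases h : cutB cs d <;>
            simp_all [List.append_assoc]

-- ===== VERDICT (by name: the statement is the Claim_ definition above) =====
theorem split_generic_params_py_spec : Claim_equal_split_generic_params_py := by
  intro params _
  unfold Spec_split_generic_params_py split_generic_params_py split_generic_params_py_alt
  have := foldA_eq_G params.toList [] [] 0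
  simp only [finishA, List.nil_append, G_nil_zero] at this
  exact this
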